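-- pv_equiv track=rewrite | github.com/shubhamvivek234/app | celery_workers/tasks/publish.py | recompute_aggregate_status
-- ===== SOURCE A (Python) =====
-- def recompute_aggregate_status(platform_results: dict) -> str:
--     statuses = {v.get("status") for v in platform_results.values()}
--     if not statuses:
--         return "scheduled"
--     if statuses == {"published"}:
--         return "published"
--     if statuses == {"failed"}:
--         return "failed"
--     if statuses == {"cancelled"}:
--         return "cancelled"
--     terminal = {"published", "failed", "cancelled"}
--     if statuses & {"processing", "retrying", "queued"}:
--         return "processing"
--     if statuses.issubset(terminal) and "published" in statuses:
--         return "partial"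
--     return "processing"
-- ===== SOURCE B (Python) =====
-- _CAT = {"published": "P", "failed": "F", "cancelled": "C",
--         "processing": "A", "retrying": "A", "queued": "A"}
--
-- # aggregate status indexed by the canonical (sorted) string of distinct categories present
-- _TABLE = {
--     "": "scheduled",
--     "A": "processing", "C": "cancelled", "F": "failed", "O": "processing", "P": "published",
--     "AC": "processing", "AF": "processing", "AO": "processing", "AP": "processing",
--     "CF": "processing", "CO": "processing", "CP": "partial", "FO": "processing",
--     "FP": "partial", "OP": "processing",
--     "ACF": "processing", "ACO": "processing", "ACP": "processing", "AFO": "processing",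
--     "AFP": "processing", "AOP": "processing", "CFO": "processing", "CFP": "partial",
--     "COP": "processing", "FOP": "processing",
--     "ACFO": "processing", "ACFP": "processing", "ACOP": "processing", "AFOP": "processing",
--     "CFOP": "processing", "ACFOP": "processing",
-- }
--
-- def recompute_aggregate_status(platform_results: dict) -> str:
--     key = "".join(sorted({_CAT.get(v.get("status"), "O") for v in platform_results.values()}))
--     return _TABLE[key]
-- ===== Notes on version B (the rewrite author's own statement) =====
-- stated objective: alternative
-- what changed: Replaces A's chain of set equality/intersection/subset probes by classifying each status into one of five category letters, canonicalising the distinct categories into a sorted key string, and returning the answer from a precomputed 32-entry lookup table — the decision logic becomes data, not branches.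
import Mathlib
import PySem

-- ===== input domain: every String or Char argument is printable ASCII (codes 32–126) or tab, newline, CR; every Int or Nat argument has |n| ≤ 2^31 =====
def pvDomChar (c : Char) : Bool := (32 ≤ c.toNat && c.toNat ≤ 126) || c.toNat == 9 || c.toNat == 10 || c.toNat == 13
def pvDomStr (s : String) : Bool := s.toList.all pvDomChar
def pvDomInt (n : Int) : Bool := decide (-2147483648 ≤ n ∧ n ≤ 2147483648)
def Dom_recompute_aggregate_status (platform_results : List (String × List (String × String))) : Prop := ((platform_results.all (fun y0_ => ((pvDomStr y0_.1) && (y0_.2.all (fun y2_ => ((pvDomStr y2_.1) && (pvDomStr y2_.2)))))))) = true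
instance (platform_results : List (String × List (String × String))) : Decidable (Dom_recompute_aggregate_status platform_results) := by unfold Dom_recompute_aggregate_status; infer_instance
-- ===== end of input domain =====

-- One honest line: B replaces A's chain of set equality/intersection/subset probes by classifying
-- each status into a category letter, sorting the distinct letters into a canonical key and
-- returning the answer from a precomputed 32-entry table (alternative decomposition, same cost).

-- shared input decoding: v.get("status") for one platform's result dict
def pvStatusOf (v : List (String × String)) : Option String :=
  (PySem.Dict.ofList v).get? "status"

-- ===== PORT A =====
def recompute_aggregate_status (platform_results : List (String × List (String × String))) : String :=
  let statuses : PySem.Set (Option String) :=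
    PySem.Set.ofList (((PySem.Dict.ofList platform_results).values).map pvStatusOf)
  if statuses = [] then "scheduled"
  else if PySem.Set.equal statuses (PySem.Set.ofList [some "published"]) then "published"
  else if PySem.Set.equal statuses (PySem.Set.ofList [some "failed"]) then "failed"
  else if PySem.Set.equal statuses (PySem.Set.ofList [some "cancelled"]) then "cancelled"
  else if ¬ (PySem.Set.inter statuses (PySem.Set.ofList [some "processing", some "retrying", some "queued"]) = []) then "processing"
  else if PySem.Set.issubset statuses (PySem.Set.ofList [some "published", some "failed", some "cancelled"]) && PySem.Set.contains statuses (some "published") then "partial"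
  else "processing"

-- ===== PORT B =====
-- _CAT lookup with default "O"; _CAT.get(None, "O") is "O" (None is never a key)
def pvCatDict : List (String × String) :=
  [("published", "P"), ("failed", "F"), ("cancelled", "C"),
   ("processing", "A"), ("retrying", "A"), ("queued", "A")]

def pvCat (s : Option String) : String :=
  match s with
  | none => "O"
  | some t => (PySem.Dict.ofList pvCatDict).getD t "O"

def pvTable : List (String × String) :=
  [("", "scheduled"),
   ("A", "processing"), ("C", "cancelled"), ("F", "failed"), ("O", "processing"), ("P", "published"),
   ("AC", "processing"), ("AF", "processing"), ("AO", "processing"), ("AP", "processing"),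
   ("CF", "processing"), ("CO", "processing"), ("CP", "partial"), ("FO", "processing"),
   ("FP", "partial"), ("OP", "processing"),
   ("ACF", "processing"), ("ACO", "processing"), ("ACP", "processing"), ("AFO", "processing"),
   ("AFP", "processing"), ("AOP", "processing"), ("CFO", "processing"), ("CFP", "partial"),
   ("COP", "processing"), ("FOP", "processing"),
   ("ACFO", "processing"), ("ACFP", "processing"), ("ACOP", "processing"), ("AFOP", "processing"),
   ("CFOP", "processing"), ("ACFOP", "processing")]

def recompute_aggregate_status_alt (platform_results : List (String × List (String × String))) : String :=
  let key := PySem.Str.join ""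
    (PySem.List.sorted
      (PySem.Set.ofList (((PySem.Dict.ofList platform_results).values).map (fun v => pvCat (pvStatusOf v))))
      (fun x => x) false)
  -- _TABLE[key]: the key is always present in the table, so the "" fallback of getD is unreachable
  ((PySem.Dict.ofList pvTable).get? key).getD ""

-- ===== PRECONDITION & SPEC =====
def Spec_recompute_aggregate_status (platform_results : List (String × List (String × String))) (out : String) : Prop := out = recompute_aggregate_status_alt platform_results
instance (platform_results : List (String × List (String × String))) (out : String) : Decidable (Spec_recompute_aggregate_status platform_results out) := by unfold Spec_recompute_aggregate_status; infer_instance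

-- ===== CLAIM (what is proved, stated in full; the proofs are below) =====
def Claim_equal_recompute_aggregate_status : Prop := ∀ (platform_results : List (String × List (String × String))), Dom_recompute_aggregate_status platform_results → Spec_recompute_aggregate_status platform_results (recompute_aggregate_status platform_results)

-- ===== LEMMAS AND PROOFS =====

-- proof-side characterization: the five category-presence flags of a status list
structure PvFlags where
  seen : Bool
  pub : Bool
  fail : Bool
  canc : Bool
  active : Bool
  other : Bool
deriving Repr, DecidableEq

def pvStep (st : PvFlags) (s : Option String) : PvFlags :=
  if s = some "published" then { st with seen := true, pub := true }
  else if s = some "failed" then { st with seen := true, fail := true }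
  else if s = some "cancelled" then { st with seen := true, canc := true }
  else if s = some "processing" ∨ s = some "retrying" ∨ s = some "queued" then { st with seen := true, active := true }
  else { st with seen := true, other := true }

def pvFinish (st : PvFlags) : String :=
  if !st.seen then "scheduled"
  else if st.active then "processing"
  else if st.pub && !(st.fail || st.canc || st.other) then "published"
  else if st.fail && !(st.pub || st.canc || st.other) then "failed"
  else if st.canc && !(st.pub || st.fail || st.other) then "cancelled"
  else if st.pub && !st.other then "partial"
  else "processing"

def pvIsAct (s : Option String) : Bool :=
  s == some "processing" || s == some "retrying" || s == some "queued"

def pvIsOth (s : Option String) : Bool :=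
  !(s == some "published" || s == some "failed" || s == some "cancelled" || pvIsAct s)

-- the fold computes exactly the "any" flags
lemma pvFold_flags (l : List (Option String)) (st : PvFlags) :
    l.foldl pvStep st =
      ⟨st.seen || !l.isEmpty,
       st.pub || l.any (· == some "published"),
       st.fail || l.any (· == some "failed"),
       st.canc || l.any (· == some "cancelled"),
       st.active || l.any pvIsAct,
       st.other || l.any pvIsOth⟩ := by
  induction l generalizing st with
  | nil => simp
  | cons a t ih =>
    simp only [List.foldl_cons, ih, List.any_cons, List.isEmpty_cons]
    unfold pvStep pvIsAct pvIsOth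
    rcases st with ⟨s1, s2, s3, s4, s5, s6⟩
    by_cases h1 : a = some "published"
    · subst h1; simp [Bool.or_assoc]
    · by_cases h2 : a = some "failed"
      · subst h2; simp [Bool.or_assoc]
      · by_cases h3 : a = some "cancelled"
        · subst h3; simp [Bool.or_assoc]
        · by_cases h4 : a = some "processing" ∨ a = some "retrying" ∨ a = some "queued"
          · simp only [if_neg h1, if_neg h2, if_neg h3, if_pos h4]
            rcases h4 with h | h | h <;> subst h <;> simp [pvIsAct, Bool.or_assoc]
          · rw [if_neg h4]
            push Not at h4
            obtain ⟨h4a, h4b, h4c⟩ := h4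
            have e1 : (a == some "published") = false := by simpa using h1
            have e2 : (a == some "failed") = false := by simpa using h2
            have e3 : (a == some "cancelled") = false := by simpa using h3
            have e4 : (a == some "processing") = false := by simpa using h4a
            have e5 : (a == some "retrying") = false := by simpa using h4b
            have e6 : (a == some "queued") = false := by simpa using h4c
            simp [h1, h2, h3, e1, e2, e3, e4, e5, e6, pvIsAct, Bool.or_assoc]

-- every status falls into one of the five categories
lemma pvCover (y : Option String) :
    (y == some "published") = true ∨ (y == some "failed") = true ∨
    (y == some "cancelled") = true ∨ pvIsAct y = true ∨ pvIsOth y = true := by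
  by_cases h : (y == some "published" || y == some "failed" || y == some "cancelled" || pvIsAct y) = true
  · simp only [Bool.or_eq_true] at h; tauto
  · right; right; right; right; simp [pvIsOth]; simpa using h

lemma pvOfList_eq_nil_iff (l : List (Option String)) :
    PySem.Set.ofList l = [] ↔ l = [] := by
  constructor
  · intro h
    cases l with
    | nil => rfl
    | cons a t =>
      exfalso
      have : a ∈ PySem.Set.ofList (a :: t) := by
        rw [PySem.Set.mem_ofList]; exact List.mem_cons_self
      rw [h] at this; exact absurd this (List.not_mem_nil)
  · rintro rfl; rfl

lemma pvEqual_single_iff (l : List (Option String)) (x : Option String) :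
    PySem.Set.equal (PySem.Set.ofList l) (PySem.Set.ofList [x]) = true ↔
      (x ∈ l ∧ ∀ y ∈ l, y = x) := by
  rw [PySem.Set.equal_iff]
  constructor
  · intro h
    constructor
    · have := (h x).2; simp [PySem.Set.mem_ofList] at this; exact this
    · intro y hy
      have := (h y).1; simp [PySem.Set.mem_ofList] at this; exact this hy
  · intro ⟨hx, hall⟩ y
    simp only [PySem.Set.mem_ofList, List.mem_singleton]
    exact ⟨fun hy => hall y hy, fun hy => hy ▸ hx⟩

lemma pvInter_act_iff (l : List (Option String)) :
    PySem.Set.inter (PySem.Set.ofList l)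
        (PySem.Set.ofList [some "processing", some "retrying", some "queued"]) = [] ↔
      l.any pvIsAct = false := by
  rw [List.eq_nil_iff_forall_not_mem]
  rw [← Bool.not_eq_true, List.any_eq_true]
  constructor
  · intro h hex
    obtain ⟨y, hy, hact⟩ := hex
    refine h y ?_
    rw [PySem.Set.mem_inter]
    refine ⟨(PySem.Set.mem_ofList _ _).2 hy, (PySem.Set.mem_ofList _ _).2 ?_⟩
    simp only [pvIsAct, Bool.or_eq_true, beq_iff_eq] at hact
    simp only [List.mem_cons, List.not_mem_nil, or_false]
    tauto
  · intro h y hy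
    rw [PySem.Set.mem_inter, PySem.Set.mem_ofList, PySem.Set.mem_ofList] at hy
    refine h ⟨y, hy.1, ?_⟩
    have := hy.2
    simp only [List.mem_cons, List.not_mem_nil, or_false] at this
    simp only [pvIsAct, Bool.or_eq_true, beq_iff_eq]
    tauto

lemma pvSubset_term_iff (l : List (Option String)) :
    PySem.Set.issubset (PySem.Set.ofList l)
        (PySem.Set.ofList [some "published", some "failed", some "cancelled"]) = true ↔
      (l.any pvIsAct = false ∧ l.any pvIsOth = false) := by
  rw [PySem.Set.issubset_iff]
  simp only [PySem.Set.mem_ofList]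
  rw [← Bool.not_eq_true, ← Bool.not_eq_true, List.any_eq_true, List.any_eq_true]
  constructor
  · intro h
    constructor
    · rintro ⟨y, hy, hact⟩
      have := h y hy
      simp only [List.mem_cons, List.not_mem_nil, or_false] at this
      simp only [pvIsAct, Bool.or_eq_true, beq_iff_eq] at hact
      rcases this with h' | h' | h' <;> subst h' <;> simp at hact
    · rintro ⟨y, hy, hoth⟩
      have := h y hy
      simp only [List.mem_cons, List.not_mem_nil, or_false] at this
      simp only [pvIsOth, pvIsAct, Bool.not_eq_true', Bool.or_eq_false_iff, beq_eq_false_iff_ne] at hoth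
      rcases this with h' | h' | h' <;> subst h' <;> simp at hoth
  · rintro ⟨hact, hoth⟩ y hy
    simp only [List.mem_cons, List.not_mem_nil, or_false]
    rcases pvCover y with h | h | h | h | h
    · left; exact eq_of_beq h
    · right; left; exact eq_of_beq h
    · right; right; exact eq_of_beq h
    · exact absurd ⟨y, hy, h⟩ hact
    · exact absurd ⟨y, hy, h⟩ hoth

-- A's value as a function of the flags
lemma pvKeyA (l : List (Option String)) :
    (let statuses : PySem.Set (Option String) := PySem.Set.ofList l
     if statuses = [] then "scheduled"
     else if PySem.Set.equal statuses (PySem.Set.ofList [some "published"]) then "published"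
     else if PySem.Set.equal statuses (PySem.Set.ofList [some "failed"]) then "failed"
     else if PySem.Set.equal statuses (PySem.Set.ofList [some "cancelled"]) then "cancelled"
     else if ¬ (PySem.Set.inter statuses (PySem.Set.ofList [some "processing", some "retrying", some "queued"]) = []) then "processing"
     else if PySem.Set.issubset statuses (PySem.Set.ofList [some "published", some "failed", some "cancelled"]) && PySem.Set.contains statuses (some "published") then "partial"
     else "processing")
    = pvFinish (l.foldl pvStep ⟨false, false, false, false, false, false⟩) := by
  rw [pvFold_flags]
  by_cases hnil : l = []
  · subst hnil; simp [pvFinish]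
  · have hne : ¬ (PySem.Set.ofList l = []) := fun h => hnil ((pvOfList_eq_nil_iff l).1 h)
    have hisE : l.isEmpty = false := by simpa [List.isEmpty_iff] using hnil
    simp only [hisE, Bool.not_false, Bool.false_or]
    simp only [if_neg hne]
    by_cases ha : l.any pvIsAct = true
    · have hinter : ¬ (PySem.Set.inter (PySem.Set.ofList l) (PySem.Set.ofList [some "processing", some "retrying", some "queued"]) = []) := by
        rw [pvInter_act_iff]; simp [ha]
      have hs1 : ¬ (PySem.Set.equal (PySem.Set.ofList l) (PySem.Set.ofList [some "published"]) = true) := by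
        rw [pvEqual_single_iff]
        rintro ⟨-, hall⟩
        obtain ⟨y, hy, hya⟩ := List.any_eq_true.1 ha
        have := hall y hy; subst this; simp [pvIsAct] at hya
      have hs2 : ¬ (PySem.Set.equal (PySem.Set.ofList l) (PySem.Set.ofList [some "failed"]) = true) := by
        rw [pvEqual_single_iff]
        rintro ⟨-, hall⟩
        obtain ⟨y, hy, hya⟩ := List.any_eq_true.1 ha
        have := hall y hy; subst this; simp [pvIsAct] at hya
      have hs3 : ¬ (PySem.Set.equal (PySem.Set.ofList l) (PySem.Set.ofList [some "cancelled"]) = true) := by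
        rw [pvEqual_single_iff]
        rintro ⟨-, hall⟩
        obtain ⟨y, hy, hya⟩ := List.any_eq_true.1 ha
        have := hall y hy; subst this; simp [pvIsAct] at hya
      simp [pvFinish, hs1, hs2, hs3, hinter, ha]
    · have ha' : l.any pvIsAct = false := by simpa using ha
      have hinter : PySem.Set.inter (PySem.Set.ofList l) (PySem.Set.ofList [some "processing", some "retrying", some "queued"]) = [] :=
        (pvInter_act_iff l).2 ha'
      by_cases ho : l.any pvIsOth = true
      · have hsub : ¬ (PySem.Set.issubset (PySem.Set.ofList l) (PySem.Set.ofList [some "published", some "failed", some "cancelled"]) = true) := by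
          rw [pvSubset_term_iff]; rintro ⟨-, h⟩; simp [ho] at h
        have hs1 : ¬ (PySem.Set.equal (PySem.Set.ofList l) (PySem.Set.ofList [some "published"]) = true) := by
          rw [pvEqual_single_iff]
          rintro ⟨-, hall⟩
          obtain ⟨y, hy, hya⟩ := List.any_eq_true.1 ho
          have := hall y hy; subst this; simp [pvIsOth, pvIsAct] at hya
        have hs2 : ¬ (PySem.Set.equal (PySem.Set.ofList l) (PySem.Set.ofList [some "failed"]) = true) := by
          rw [pvEqual_single_iff]
          rintro ⟨-, hall⟩
          obtain ⟨y, hy, hya⟩ := List.any_eq_true.1 ho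
          have := hall y hy; subst this; simp [pvIsOth, pvIsAct] at hya
        have hs3 : ¬ (PySem.Set.equal (PySem.Set.ofList l) (PySem.Set.ofList [some "cancelled"]) = true) := by
          rw [pvEqual_single_iff]
          rintro ⟨-, hall⟩
          obtain ⟨y, hy, hya⟩ := List.any_eq_true.1 ho
          have := hall y hy; subst this; simp [pvIsOth, pvIsAct] at hya
        simp [pvFinish, hs1, hs2, hs3, hinter, hsub, ha', ho]
      · have ho' : l.any pvIsOth = false := by simpa using ho
        have hsub : PySem.Set.issubset (PySem.Set.ofList l) (PySem.Set.ofList [some "published", some "failed", some "cancelled"]) = true :=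
          (pvSubset_term_iff l).2 ⟨ha', ho'⟩
        have hcat : ∀ y ∈ l, y = some "published" ∨ y = some "failed" ∨ y = some "cancelled" := by
          intro y hy
          rcases pvCover y with h | h | h | h | h
          · exact Or.inl (eq_of_beq h)
          · exact Or.inr (Or.inl (eq_of_beq h))
          · exact Or.inr (Or.inr (eq_of_beq h))
          · exact absurd (List.any_eq_true.2 ⟨y, hy, h⟩) ha
          · exact absurd (List.any_eq_true.2 ⟨y, hy, h⟩) ho
        by_cases hp : l.any (· == some "published") = true
        · by_cases hf : l.any (· == some "failed") = true
          · have hs1 : ¬ (PySem.Set.equal (PySem.Set.ofList l) (PySem.Set.ofList [some "published"]) = true) := by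
              rw [pvEqual_single_iff]
              rintro ⟨-, hall⟩
              obtain ⟨y, hy, hya⟩ := List.any_eq_true.1 hf
              have := hall y hy; subst this; simp at hya
            have hs2 : ¬ (PySem.Set.equal (PySem.Set.ofList l) (PySem.Set.ofList [some "failed"]) = true) := by
              rw [pvEqual_single_iff]
              rintro ⟨-, hall⟩
              obtain ⟨y, hy, hya⟩ := List.any_eq_true.1 hp
              have := hall y hy; subst this; simp at hya
            have hs3 : ¬ (PySem.Set.equal (PySem.Set.ofList l) (PySem.Set.ofList [some "cancelled"]) = true) := by
              rw [pvEqual_single_iff]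
              rintro ⟨-, hall⟩
              obtain ⟨y, hy, hya⟩ := List.any_eq_true.1 hp
              have := hall y hy; subst this; simp at hya
            have hpm : some "published" ∈ l := by simpa using hp
            simp [pvFinish, hs1, hs2, hs3, hinter, hsub, ha', ho', hp, hf, hpm]
          · have hf' : l.any (· == some "failed") = false := eq_false_of_ne_true hf
            by_cases hc : l.any (· == some "cancelled") = true
            · have hs1 : ¬ (PySem.Set.equal (PySem.Set.ofList l) (PySem.Set.ofList [some "published"]) = true) := by
                rw [pvEqual_single_iff]
                rintro ⟨-, hall⟩
                obtain ⟨y, hy, hya⟩ := List.any_eq_true.1 hc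
                have := hall y hy; subst this; simp at hya
              have hs2 : ¬ (PySem.Set.equal (PySem.Set.ofList l) (PySem.Set.ofList [some "failed"]) = true) := by
                rw [pvEqual_single_iff]
                rintro ⟨-, hall⟩
                obtain ⟨y, hy, hya⟩ := List.any_eq_true.1 hp
                have := hall y hy; subst this; simp at hya
              have hs3 : ¬ (PySem.Set.equal (PySem.Set.ofList l) (PySem.Set.ofList [some "cancelled"]) = true) := by
                rw [pvEqual_single_iff]
                rintro ⟨-, hall⟩
                obtain ⟨y, hy, hya⟩ := List.any_eq_true.1 hp
                have := hall y hy; subst this; simp at hya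
              have hpm : some "published" ∈ l := by simpa using hp
              simp [pvFinish, hs1, hs2, hs3, hinter, hsub, ha', ho', hp, hf', hc, hpm]
            · have hc' : l.any (· == some "cancelled") = false := eq_false_of_ne_true hc
              have hall : ∀ y ∈ l, y = some "published" := by
                intro y hy
                rcases hcat y hy with h | h | h
                · exact h
                · exact absurd (List.any_eq_true.2 ⟨y, hy, by simp [h]⟩) (ne_true_of_eq_false hf')
                · exact absurd (List.any_eq_true.2 ⟨y, hy, by simp [h]⟩) (ne_true_of_eq_false hc')
              have hmem : some "published" ∈ l := by
                obtain ⟨y, hy, hya⟩ := List.any_eq_true.1 hp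
                exact (eq_of_beq hya) ▸ hy
              have hs1 : PySem.Set.equal (PySem.Set.ofList l) (PySem.Set.ofList [some "published"]) = true :=
                (pvEqual_single_iff l _).2 ⟨hmem, hall⟩
              simp [pvFinish, hs1, ha', ho', hp, hf', hc']
        · have hp' : l.any (· == some "published") = false := eq_false_of_ne_true hp
          by_cases hf : l.any (· == some "failed") = true
          · by_cases hc : l.any (· == some "cancelled") = true
            · have hs1 : ¬ (PySem.Set.equal (PySem.Set.ofList l) (PySem.Set.ofList [some "published"]) = true) := by
                rw [pvEqual_single_iff]
                rintro ⟨-, hall⟩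
                obtain ⟨y, hy, hya⟩ := List.any_eq_true.1 hf
                have := hall y hy; subst this; simp at hya
              have hs2 : ¬ (PySem.Set.equal (PySem.Set.ofList l) (PySem.Set.ofList [some "failed"]) = true) := by
                rw [pvEqual_single_iff]
                rintro ⟨-, hall⟩
                obtain ⟨y, hy, hya⟩ := List.any_eq_true.1 hc
                have := hall y hy; subst this; simp at hya
              have hs3 : ¬ (PySem.Set.equal (PySem.Set.ofList l) (PySem.Set.ofList [some "cancelled"]) = true) := by
                rw [pvEqual_single_iff]
                rintro ⟨-, hall⟩
                obtain ⟨y, hy, hya⟩ := List.any_eq_true.1 hf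
                have := hall y hy; subst this; simp at hya
              have hpm : some "published" ∉ l := fun hmem => ne_true_of_eq_false hp' (List.any_eq_true.2 ⟨_, hmem, by simp⟩)
              simp [pvFinish, hs1, hs2, hs3, hinter, hsub, ha', ho', hp', hf, hc, hpm]
            · have hc' : l.any (· == some "cancelled") = false := eq_false_of_ne_true hc
              have hall : ∀ y ∈ l, y = some "failed" := by
                intro y hy
                rcases hcat y hy with h | h | h
                · exact absurd (List.any_eq_true.2 ⟨y, hy, by simp [h]⟩) (ne_true_of_eq_false hp')
                · exact h
                · exact absurd (List.any_eq_true.2 ⟨y, hy, by simp [h]⟩) (ne_true_of_eq_false hc')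
              have hmem : some "failed" ∈ l := by
                obtain ⟨y, hy, hya⟩ := List.any_eq_true.1 hf
                exact (eq_of_beq hya) ▸ hy
              have hs2 : PySem.Set.equal (PySem.Set.ofList l) (PySem.Set.ofList [some "failed"]) = true :=
                (pvEqual_single_iff l _).2 ⟨hmem, hall⟩
              have hs1 : ¬ (PySem.Set.equal (PySem.Set.ofList l) (PySem.Set.ofList [some "published"]) = true) := by
                rw [pvEqual_single_iff]
                rintro ⟨-, hall'⟩
                obtain ⟨y, hy, hya⟩ := List.any_eq_true.1 hf
                have := hall' y hy; subst this; simp at hya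
              simp [pvFinish, hs1, hs2, ha', ho', hp', hf, hc']
          · have hf' : l.any (· == some "failed") = false := eq_false_of_ne_true hf
            by_cases hc : l.any (· == some "cancelled") = true
            · have hall : ∀ y ∈ l, y = some "cancelled" := by
                intro y hy
                rcases hcat y hy with h | h | h
                · exact absurd (List.any_eq_true.2 ⟨y, hy, by simp [h]⟩) (ne_true_of_eq_false hp')
                · exact absurd (List.any_eq_true.2 ⟨y, hy, by simp [h]⟩) (ne_true_of_eq_false hf')
                · exact h
              have hmem : some "cancelled" ∈ l := by
                obtain ⟨y, hy, hya⟩ := List.any_eq_true.1 hc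
                exact (eq_of_beq hya) ▸ hy
              have hs3 : PySem.Set.equal (PySem.Set.ofList l) (PySem.Set.ofList [some "cancelled"]) = true :=
                (pvEqual_single_iff l _).2 ⟨hmem, hall⟩
              have hs1 : ¬ (PySem.Set.equal (PySem.Set.ofList l) (PySem.Set.ofList [some "published"]) = true) := by
                rw [pvEqual_single_iff]
                rintro ⟨-, hall'⟩
                obtain ⟨y, hy, hya⟩ := List.any_eq_true.1 hc
                have := hall' y hy; subst this; simp at hya
              have hs2 : ¬ (PySem.Set.equal (PySem.Set.ofList l) (PySem.Set.ofList [some "failed"]) = true) := by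
                rw [pvEqual_single_iff]
                rintro ⟨-, hall'⟩
                obtain ⟨y, hy, hya⟩ := List.any_eq_true.1 hc
                have := hall' y hy; subst this; simp at hya
              simp [pvFinish, hs1, hs2, hs3, ha', ho', hp', hf', hc]
            · exfalso
              obtain ⟨y, hy⟩ := List.exists_mem_of_ne_nil l hnil
              rcases hcat y hy with h | h | h
              · exact hp (List.any_eq_true.2 ⟨y, hy, by simp [h]⟩)
              · exact hf (List.any_eq_true.2 ⟨y, hy, by simp [h]⟩)
              · exact hc (List.any_eq_true.2 ⟨y, hy, by simp [h]⟩)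

-- ============ B side ============

-- pvCat as an explicit case split
lemma pvCat_eq (y : Option String) :
    pvCat y =
      (if y = some "published" then "P" else if y = some "failed" then "F"
       else if y = some "cancelled" then "C"
       else if y = some "processing" ∨ y = some "retrying" ∨ y = some "queued" then "A"
       else "O") := by
  cases y with
  | none => simp [pvCat]
  | some t =>
    simp only [pvCat]
    by_cases h1 : t = "published"
    · subst h1; decide
    by_cases h2 : t = "failed"
    · subst h2; decide
    by_cases h3 : t = "cancelled"
    · subst h3; decide
    by_cases h4 : t = "processing"
    · subst h4; decide
    by_cases h5 : t = "retrying"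
    · subst h5; decide
    by_cases h6 : t = "queued"
    · subst h6; decide
    have hd : PySem.Dict.ofList pvCatDict = PySem.Dict.mk pvCatDict := by decide
    rw [hd, PySem.Dict.getD_eq_get?_getD]
    simp only [pvCatDict, PySem.Dict.get?_mk_cons]
    have e1 : ("published" == t) = false := by rw [beq_eq_false_iff_ne]; exact fun h => h1 h.symm
    have e2 : ("failed" == t) = false := by rw [beq_eq_false_iff_ne]; exact fun h => h2 h.symm
    have e3 : ("cancelled" == t) = false := by rw [beq_eq_false_iff_ne]; exact fun h => h3 h.symm
    have e4 : ("processing" == t) = false := by rw [beq_eq_false_iff_ne]; exact fun h => h4 h.symm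
    have e5 : ("retrying" == t) = false := by rw [beq_eq_false_iff_ne]; exact fun h => h5 h.symm
    have e6 : ("queued" == t) = false := by rw [beq_eq_false_iff_ne]; exact fun h => h6 h.symm
    simp [e1, e2, e3, e4, e5, e6, h1, h2, h3, h4, h5, h6, PySem.Dict.get?]

lemma pvCat_pub : pvCat (some "published") = "P" := by decide

lemma pvCat_fail : pvCat (some "failed") = "F" := by decide

lemma pvCat_canc : pvCat (some "cancelled") = "C" := by decide

lemma pvCat_act (y : Option String) (h : pvIsAct y = true) : pvCat y = "A" := by
  simp only [pvIsAct, Bool.or_eq_true, beq_iff_eq] at h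
  rcases h with (h | h) | h <;> subst h <;> decide

lemma pvCat_oth (y : Option String) (h : pvIsOth y = true) : pvCat y = "O" := by
  simp only [pvIsOth, Bool.not_eq_true', Bool.or_eq_false_iff, beq_eq_false_iff_ne] at h
  obtain ⟨⟨⟨hp, hf⟩, hc⟩, ha⟩ := h
  simp only [pvIsAct, Bool.or_eq_false_iff, beq_eq_false_iff_ne] at ha
  rw [pvCat_eq, if_neg hp, if_neg hf, if_neg hc, if_neg (by tauto)]

-- canonical category list for given presence flags (alphabetical: A < C < F < O < P)
def pvCanon (a c f o p : Bool) : List String :=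
  (if a then ["A"] else []) ++ (if c then ["C"] else []) ++ (if f then ["F"] else []) ++
  (if o then ["O"] else []) ++ (if p then ["P"] else [])

lemma pvCanon_pairwise (a c f o p : Bool) :
    (pvCanon a c f o p).Pairwise (fun x y : String => x < y) := by
  cases a <;> cases c <;> cases f <;> cases o <;> cases p <;>
    simp [pvCanon, String.lt_iff_toList_lt] <;> decide

lemma pvCanon_nodup (a c f o p : Bool) : (pvCanon a c f o p).Nodup :=
  (pvCanon_pairwise a c f o p).imp (fun h => ne_of_lt h)

lemma pvCanon_mem (a c f o p : Bool) (x : String) :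
    x ∈ pvCanon a c f o p ↔
      (a = true ∧ x = "A") ∨ (c = true ∧ x = "C") ∨ (f = true ∧ x = "F") ∨
      (o = true ∧ x = "O") ∨ (p = true ∧ x = "P") := by
  cases a <;> cases c <;> cases f <;> cases o <;> cases p <;> simp [pvCanon]

-- the distinct categories of l are exactly the canonical list of its presence flags
lemma pvMem_set (l : List (Option String)) (x : String) :
    x ∈ PySem.Set.ofList (l.map pvCat) ↔
      x ∈ pvCanon (l.any pvIsAct) (l.any (· == some "cancelled")) (l.any (· == some "failed"))
            (l.any pvIsOth) (l.any (· == some "published")) := by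
  rw [PySem.Set.mem_ofList, List.mem_map, pvCanon_mem]
  constructor
  · rintro ⟨y, hy, rfl⟩
    rcases pvCover y with h | h | h | h | h
    · obtain rfl := eq_of_beq h
      exact Or.inr (Or.inr (Or.inr (Or.inr ⟨List.any_eq_true.2 ⟨_, hy, by decide⟩, pvCat_pub⟩)))
    · obtain rfl := eq_of_beq h
      exact Or.inr (Or.inr (Or.inl ⟨List.any_eq_true.2 ⟨_, hy, by decide⟩, pvCat_fail⟩))
    · obtain rfl := eq_of_beq h
      exact Or.inr (Or.inl ⟨List.any_eq_true.2 ⟨_, hy, by decide⟩, pvCat_canc⟩)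
    · exact Or.inl ⟨List.any_eq_true.2 ⟨y, hy, h⟩, pvCat_act y h⟩
    · exact Or.inr (Or.inr (Or.inr (Or.inl ⟨List.any_eq_true.2 ⟨y, hy, h⟩, pvCat_oth y h⟩)))
  · rintro (⟨h, rfl⟩ | ⟨h, rfl⟩ | ⟨h, rfl⟩ | ⟨h, rfl⟩ | ⟨h, rfl⟩) <;>
      obtain ⟨y, hy, hyc⟩ := List.any_eq_true.1 h
    · exact ⟨y, hy, pvCat_act y hyc⟩
    · exact ⟨y, hy, by rw [eq_of_beq hyc]; exact pvCat_canc⟩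
    · exact ⟨y, hy, by rw [eq_of_beq hyc]; exact pvCat_fail⟩
    · exact ⟨y, hy, pvCat_oth y hyc⟩
    · exact ⟨y, hy, by rw [eq_of_beq hyc]; exact pvCat_pub⟩

-- the table agrees with pvFinish on every nonempty flag combination
lemma pvTable_finish (a c f o p : Bool) (h : (p || f || c || a || o) = true) :
    ((PySem.Dict.ofList pvTable).get? (PySem.Str.join "" (pvCanon a c f o p))).getD ""
      = pvFinish ⟨true, p, f, c, a, o⟩ := by
  cases a <;> cases c <;> cases f <;> cases o <;> cases p <;>
    first | (exfalso; exact Bool.false_ne_true h) | decide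

-- B's value as a function of the flags
lemma pvKeyB (l : List (Option String)) :
    (((PySem.Dict.ofList pvTable).get?
        (PySem.Str.join "" (PySem.List.sorted (PySem.Set.ofList (l.map pvCat)) (fun x => x) false))).getD "")
      = pvFinish (l.foldl pvStep ⟨false, false, false, false, false, false⟩) := by
  rw [pvFold_flags]
  by_cases hnil : l = []
  · subst hnil; decide
  · have hisE : l.isEmpty = false := by simpa [List.isEmpty_iff] using hnil
    have hperm :
        (pvCanon (l.any pvIsAct) (l.any (· == some "cancelled")) (l.any (· == some "failed"))
            (l.any pvIsOth) (l.any (· == some "published"))).Perm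
          (PySem.Set.ofList (l.map pvCat)) :=
      (List.perm_ext_iff_of_nodup (pvCanon_nodup _ _ _ _ _)
        (PySem.Set.nodup_ofList _)).mpr (fun x => (pvMem_set l x).symm)
    rw [PySem.List.sorted_eq_of_perm_of_pairwise_lt _ _ _ hperm (pvCanon_pairwise _ _ _ _ _)]
    have hsome : (l.any (· == some "published") || l.any (· == some "failed") ||
        l.any (· == some "cancelled") || l.any pvIsAct || l.any pvIsOth) = true := by
      obtain ⟨y, hy⟩ := List.exists_mem_of_ne_nil l hnil
      rcases pvCover y with h | h | h | h | h
      · have hx : l.any (· == some "published") = true := List.any_eq_true.2 ⟨y, hy, h⟩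
        simp [hx]
      · have hx : l.any (· == some "failed") = true := List.any_eq_true.2 ⟨y, hy, h⟩
        simp [hx]
      · have hx : l.any (· == some "cancelled") = true := List.any_eq_true.2 ⟨y, hy, h⟩
        simp [hx]
      · have hx : l.any pvIsAct = true := List.any_eq_true.2 ⟨y, hy, h⟩
        simp [hx]
      · have hx : l.any pvIsOth = true := List.any_eq_true.2 ⟨y, hy, h⟩
        simp [hx]
    rw [pvTable_finish _ _ _ _ _ hsome]
    simp [hisE]

-- ===== VERDICT (by name: the statement is the Claim_ definition above) =====
theorem recompute_aggregate_status_spec : Claim_equal_recompute_aggregate_status := by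
  intro prs _
  unfold Spec_recompute_aggregate_status recompute_aggregate_status recompute_aggregate_status_alt
  have hA := pvKeyA (((PySem.Dict.ofList prs).values).map pvStatusOf)
  have hB := pvKeyB (((PySem.Dict.ofList prs).values).map pvStatusOf)
  rw [List.foldl_map] at hA
  rw [List.map_map] at hB
  simp only [Function.comp_def] at hB
  rw [List.foldl_map] at hB
  exact hA.trans hB.symm
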